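-- pv_equiv track=rewrite | github.com/MaxBotta/Vertiefung_Programmierung | Tobi/Adressliste.py | define_spacing
-- ===== SOURCE A (Python) =====
-- def define_spacing(string, spaltenbreite):
--     laenge = len(str(string))
--     spacing = ""
--     while laenge <= spaltenbreite:
--         leerzeichen = " "
--         spacing = spacing + leerzeichen
--         laenge = laenge + 1
--     return spacing
-- ===== SOURCE B (Python) =====
-- def define_spacing(string, spaltenbreite):
--     laenge = len(str(string))
--     return " " * (spaltenbreite - laenge + 1)
-- ===== Notes on version B (the rewrite author's own statement) =====
-- stated objective: idiomatic
-- what changed: Replaces the counter-driven while loop that appends one space per iteration with a single closed-form string multiplication " " * (spaltenbreite - len + 1), relying on Python's empty result for non-positive repeat counts.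
import Mathlib
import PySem

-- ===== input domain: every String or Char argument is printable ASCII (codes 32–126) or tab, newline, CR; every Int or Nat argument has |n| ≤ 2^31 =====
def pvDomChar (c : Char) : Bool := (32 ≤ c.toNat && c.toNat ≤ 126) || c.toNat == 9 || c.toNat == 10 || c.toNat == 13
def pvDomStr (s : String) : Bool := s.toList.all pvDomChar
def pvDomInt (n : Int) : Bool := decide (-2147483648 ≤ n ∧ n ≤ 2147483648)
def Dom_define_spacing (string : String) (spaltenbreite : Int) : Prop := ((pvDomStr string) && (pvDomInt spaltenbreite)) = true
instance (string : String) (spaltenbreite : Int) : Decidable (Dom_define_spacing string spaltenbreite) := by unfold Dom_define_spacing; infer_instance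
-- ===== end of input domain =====

-- B replaces A's per-iteration while-loop append with one closed-form " " * (spaltenbreite - len + 1) (idiomatic; non-positive counts give "").
-- ===== PORT A =====
-- while laenge <= spaltenbreite: spacing = spacing + " "; laenge = laenge + 1
def spacingLoopA (spaltenbreite laenge : Int) (spacing : String) : String :=
  if laenge ≤ spaltenbreite then
    spacingLoopA spaltenbreite (laenge + 1) (spacing ++ " ")
  else spacing
termination_by (spaltenbreite + 1 - laenge).toNat
decreasing_by omega

def define_spacing (string : String) (spaltenbreite : Int) : String :=
  spacingLoopA spaltenbreite (PySem.Str.len string) ""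

-- ===== PORT B =====
def define_spacing_alt (string : String) (spaltenbreite : Int) : String :=
  String.ofList (PySem.List.pyRepeat [' '] (spaltenbreite - PySem.Str.len string + 1))

-- ===== PRECONDITION & SPEC =====
def Spec_define_spacing (string : String) (spaltenbreite : Int) (out : String) : Prop := out = define_spacing_alt string spaltenbreite
instance (string : String) (spaltenbreite : Int) (out : String) : Decidable (Spec_define_spacing string spaltenbreite out) := by unfold Spec_define_spacing; infer_instance

-- ===== CLAIM (what is proved, stated in full; the proofs are below) =====
def Claim_equal_define_spacing : Prop := ∀ (string : String) (spaltenbreite : Int), Dom_define_spacing string spaltenbreite → Spec_define_spacing string spaltenbreite (define_spacing string spaltenbreite)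

-- ===== LEMMAS AND PROOFS =====

theorem spacingLoopA_eq (n : Nat) : ∀ (w l : Int) (acc : String),
    (w + 1 - l).toNat = n → spacingLoopA w l acc = acc ++ String.ofList (List.replicate n ' ') := by
  induction n with
  | zero =>
    intro w l acc h
    rw [spacingLoopA]
    have : ¬ l ≤ w := by omega
    simp [this, String.ofList_nil]
  | succ k ih =>
    intro w l acc h
    rw [spacingLoopA]
    have hle : l ≤ w := by omega
    simp only [hle, if_true]
    rw [ih w (l + 1) (acc ++ " ") (by omega)]
    rw [String.append_assoc]
    congr 1
    have h1 : (" " : String) = String.ofList [' '] := rfl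
    rw [h1, ← String.ofList_append, List.replicate_succ]
    rfl

-- ===== VERDICT (by name: the statement is the Claim_ definition above) =====
theorem define_spacing_spec : Claim_equal_define_spacing := by
  intro s w _
  unfold Spec_define_spacing define_spacing define_spacing_alt
  rw [spacingLoopA_eq ((w + 1 - PySem.Str.len s).toNat) w (PySem.Str.len s) "" rfl]
  rw [PySem.List.pyRepeat_singleton]
  have : (w - PySem.Str.len s + 1).toNat = (w + 1 - PySem.Str.len s).toNat := by omega
  rw [this]
  exact (String.ofList (List.replicate _ ' ')).empty_append
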